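-- pv_equiv track=rewrite | github.com/fabagaipo/cmsc137 | 2dparity.py | two_dimensional_parity_check
-- ===== SOURCE A (Python) =====
-- def two_dimensional_parity_check(array):
--     error_count = 0
--
--     row_sums = [sum(row) for row in array]
--
--     for row_sum in row_sums:
--       if row_sum % 2 != 0:
--         error_count += 1
--
--     col_sums = [sum(array[i][j] for i in range(len(array))) for j in range(len(array[0]))]
--
--     for col_sum in col_sums:
--       if col_sum % 2 != 0:
--         error_count += 1
--
--     return error_count
-- ===== SOURCE B (Python) =====
-- def two_dimensional_parity_check(array):
--     # GF(2) reformulation: only parities matter, so track them as bits.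
--     # colmask holds the running parity of every column as one integer bitmask
--     # (bit j = parity of column j so far); each row contributes its bit pattern
--     # by XOR, and the final number of odd columns is the popcount of colmask.
--     ncols = len(array[0])
--     colmask = 0
--     errors = 0
--     for row in array:
--         rowmask = 0
--         for j in range(ncols):
--             rowmask += (row[j] & 1) << j
--         colmask ^= rowmask
--         rowpar = 0
--         for x in row:
--             rowpar ^= x & 1
--         errors += rowpar
--     return errors + bin(colmask).count("1")
-- ===== Notes on version B (the rewrite author's own statement) =====
-- stated objective: alternative
-- what changed: B works over GF(2) instead of integer sums: each row's low bits are packed into a bitmask, all column parities are maintained in a single integer updated by per-row XOR, and the count of odd columns is read off as the popcount of that mask; row parity is likewise a running XOR of low bits, not a sum.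
import Mathlib
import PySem

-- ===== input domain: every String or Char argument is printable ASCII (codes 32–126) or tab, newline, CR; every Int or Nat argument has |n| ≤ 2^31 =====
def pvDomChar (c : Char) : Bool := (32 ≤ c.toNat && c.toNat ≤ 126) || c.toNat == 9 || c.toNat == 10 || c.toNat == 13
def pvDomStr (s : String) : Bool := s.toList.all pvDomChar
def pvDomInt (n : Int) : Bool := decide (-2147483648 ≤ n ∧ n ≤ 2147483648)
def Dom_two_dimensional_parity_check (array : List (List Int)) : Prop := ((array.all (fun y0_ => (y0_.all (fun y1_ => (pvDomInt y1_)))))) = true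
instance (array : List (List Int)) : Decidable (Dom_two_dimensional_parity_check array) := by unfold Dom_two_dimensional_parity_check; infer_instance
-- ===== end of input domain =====

-- B reformulates the task over GF(2): it tracks only parities, keeping all column
-- parities in ONE integer bitmask updated by XOR per row, and pops the bit count at
-- the end, instead of A's integer row/column sums; same return value on Pre_.

-- ===== PORT A =====
def two_dimensional_parity_check (array : List (List Int)) : Int :=
  let error_count : Int := 0
  let row_sums := array.map (fun row => row.foldl (· + ·) 0)
  let ec1 := row_sums.foldl
    (fun ec s => if PySem.Int.mod s 2 ≠ 0 then ec + 1 else ec) error_count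
  -- len(array[0]) raises IndexError on [] (excluded by Pre_); array[i]/[j] in range under Pre_
  let col_sums := (PySem.List.pyRange 0 ((PySem.List.pyGetD array 0 []).length : Int) 1).map
    (fun j => (PySem.List.pyRange 0 (array.length : Int) 1).foldl
      (fun acc i => acc + PySem.List.pyGetD (PySem.List.pyGetD array i []) j 0) 0)
  col_sums.foldl (fun ec s => if PySem.Int.mod s 2 ≠ 0 then ec + 1 else ec) ec1

-- ===== PORT B =====
def two_dimensional_parity_check_alt (array : List (List Int)) : Int :=
  let ncols := (PySem.List.pyGetD array 0 []).length
  -- one pass: state = (colmask, errors); 'for j in range(ncols)' is a fold over List.range ncols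
  let st := array.foldl
    (fun (st : Int × Int) row =>
      let rowmask := (List.range ncols).foldl
        (fun m (j : Nat) => m + (PySem.Int.band (PySem.List.pyGetD row (j : Int) 0) 1) <<< j) 0
      let rowpar := row.foldl (fun p x => PySem.Int.bxor p (PySem.Int.band x 1)) 0
      (PySem.Int.bxor st.1 rowmask, st.2 + rowpar))
    (0, 0)
  -- bin(colmask).count("1"): colmask is nonnegative, so this is exactly its popcount
  st.2 + (PySem.Int.bitCount st.1 : Int)

-- ===== PRECONDITION & SPEC =====
-- Pre_ excludes exactly the inputs where Python A raises IndexError: the empty array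
-- (len(array[0])) and arrays with a row shorter than the first row (array[i][j]).
def Pre_two_dimensional_parity_check (array : List (List Int)) : Prop :=
  array ≠ [] ∧ ∀ row ∈ array, (array.headD []).length ≤ row.length
instance (array : List (List Int)) : Decidable (Pre_two_dimensional_parity_check array) := by
  unfold Pre_two_dimensional_parity_check; infer_instance
def pvWitness_two_dimensional_parity_check : List (List Int) := [[1, 0, 1], [0, 1, 1]]

def Spec_two_dimensional_parity_check (array : List (List Int)) (out : Int) : Prop := out = two_dimensional_parity_check_alt array
instance (array : List (List Int)) (out : Int) : Decidable (Spec_two_dimensional_parity_check array out) := by unfold Spec_two_dimensional_parity_check; infer_instance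

-- ===== CLAIM (what is proved, stated in full; the proofs are below) =====
def Claim_equal_two_dimensional_parity_check : Prop := ∀ (array : List (List Int)), Dom_two_dimensional_parity_check array → Pre_two_dimensional_parity_check array → Spec_two_dimensional_parity_check array (two_dimensional_parity_check array)

-- ===== LEMMAS AND PROOFS =====

-- parity of an integer, and a bit list's value in binary (low bit first)
def oddb (x : Int) : Bool := decide (x % 2 = 1)
def bi (b : Bool) : Int := if b then 1 else 0
def bitsVal : List Bool → Nat
  | [] => 0
  | b :: bs => Nat.bit b (bitsVal bs)

theorem oddb_add (a b : Int) : oddb (a + b) = (oddb a != oddb b) := by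
  rcases Int.emod_two_eq a with h1 | h1 <;> rcases Int.emod_two_eq b with h2 | h2 <;>
    simp [oddb, h1, h2, show (a + b) % 2 = (a % 2 + b % 2) % 2 from by omega]

theorem mod_two_bi (x : Int) : PySem.Int.mod x 2 = bi (oddb x) := by
  rw [PySem.Int.mod_eq_emod_of_pos (a:=x) (b:=2) (by norm_num)]
  rcases Int.emod_two_eq x with h | h <;> simp [bi, oddb, h]

theorem odd_cond (s : Int) : (PySem.Int.mod s 2 ≠ 0) = (oddb s = true) := by
  rw [PySem.Int.mod_eq_emod_of_pos (a:=s) (b:=2) (by norm_num)]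
  rcases Int.emod_two_eq s with h | h <;> simp [oddb, h]

theorem bitsVal_append (bs : List Bool) (b : Bool) :
    bitsVal (bs ++ [b]) = bitsVal bs + b.toNat * 2 ^ bs.length := by
  induction bs with
  | nil => simp [bitsVal, Nat.bit_val]
  | cons c cs ih =>
    simp only [List.cons_append, bitsVal, Nat.bit_val, ih, List.length_cons]
    ring

theorem bitsVal_replicate (n : Nat) : bitsVal (List.replicate n false) = 0 := by
  induction n with
  | zero => rfl
  | succ m ih => simp [List.replicate_succ, bitsVal, Nat.bit_val, ih]

theorem bitsVal_xor (bs cs : List Bool) (h : bs.length = cs.length) :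
    bitsVal bs ^^^ bitsVal cs = bitsVal (List.zipWith bne bs cs) := by
  induction bs generalizing cs with
  | nil => cases cs with
    | nil => rfl
    | cons c cs' => simp at h
  | cons b bs' ih =>
    cases cs with
    | nil => simp at h
    | cons c cs' =>
      simp only [List.length_cons, Nat.succ.injEq] at h
      simp only [bitsVal, List.zipWith_cons_cons, Nat.xor_bit, ih cs' h]

theorem bitsVal_zero_countP (bs : List Bool) (h : bitsVal bs = 0) :
    bs.countP (fun b => b) = 0 := by
  induction bs with
  | nil => rfl
  | cons b bs' ih =>
    simp only [bitsVal, Nat.bit_val] at h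
    have hb : b = false := by cases b <;> simp_all
    have hv : bitsVal bs' = 0 := by omega
    simp [hb, ih hv]

theorem bitCount_bitsVal (bs : List Bool) :
    PySem.Int.bitCount ((bitsVal bs : Nat) : Int) = bs.countP (fun b => b) := by
  induction bs with
  | nil => simp [bitsVal, PySem.Int.bitCount_zero]
  | cons b bs' ih =>
    by_cases h0 : bitsVal (b :: bs') = 0
    · have hb : b = false := by
        simp only [bitsVal, Nat.bit_val] at h0; cases b <;> simp_all
      have hv : bitsVal bs' = 0 := by
        simp only [bitsVal, Nat.bit_val] at h0; omega
      rw [h0]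
      simp [hb, bitsVal_zero_countP bs' hv, PySem.Int.bitCount_zero]
    · rw [PySem.Int.bitCount_natCast (Nat.pos_of_ne_zero h0)]
      have h2 : bitsVal (b :: bs') % 2 = b.toNat := by
        simp only [bitsVal, Nat.bit_val]; cases b <;> simp
      have h3 : bitsVal (b :: bs') / 2 = bitsVal bs' := by
        simp only [bitsVal, Nat.bit_val]; cases b <;> omega
      rw [h2, h3, ih]
      cases b <;> simp [Nat.add_comm]

-- the per-row bit pattern B builds by shifting equals the value of the row's parity bits
theorem rowmask_eq (row : List Int) (n : Nat) :
    (List.range n).foldl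
      (fun m (j : Nat) => m + (PySem.Int.band (PySem.List.pyGetD row (j : Int) 0) 1) <<< j) 0
    = ((bitsVal ((List.range n).map
        (fun (j : Nat) => oddb (PySem.List.pyGetD row (j : Int) 0))) : Nat) : Int) := by
  induction n with
  | zero => simp [bitsVal]
  | succ m ih =>
    rw [List.range_succ, List.foldl_append]
    simp only [List.map_append, List.map_cons, List.map_nil]
    rw [bitsVal_append]
    simp only [List.foldl_cons, List.foldl_nil, ih, List.length_map, List.length_range]
    rw [PySem.Int.band_one, mod_two_bi, Int.shiftLeft_eq]
    push_cast
    cases h : oddb (PySem.List.pyGetD row (m : Int) 0) <;> simp [bi]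

-- B's running row-parity xor equals 0/1 according to the parity of the row sum
theorem rowpar_eq (row : List Int) : ∀ acc : Int,
    row.foldl (fun p x => PySem.Int.bxor p (PySem.Int.band x 1)) (bi (oddb acc))
    = bi (oddb (row.foldl (· + ·) acc)) := by
  induction row with
  | nil => intro acc; rfl
  | cons x xs ih =>
    intro acc
    have hstep : PySem.Int.bxor (bi (oddb acc)) (PySem.Int.band x 1) = bi (oddb (acc + x)) := by
      rw [PySem.Int.band_one, mod_two_bi, oddb_add]
      cases oddb acc <;> cases oddb x <;> (simp [bi]; try rfl)
    simpa [hstep] using ih (acc + x)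

-- folding Boolean parity over rows equals the parity of the folded column sum
theorem boolfold_sum (rows : List (List Int)) (j : Int) : ∀ acc : Int,
    rows.foldl (fun b row => b != oddb (PySem.List.pyGetD row j 0)) (oddb acc)
    = oddb (rows.foldl (fun a row => a + PySem.List.pyGetD row j 0) acc) := by
  induction rows with
  | nil => intro acc; rfl
  | cons r rs ih =>
    intro acc
    simpa [← oddb_add] using ih (acc + PySem.List.pyGetD r j 0)

-- the zipWith-bne fold over rows, read back per column index
theorem zipfold_getD (rows : List (List Int)) (n : Nat) : ∀ init : List Bool,
    init.length = n → ∀ j : Nat, j < n →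
    (rows.foldl (fun acc row => List.zipWith bne acc
       ((List.range n).map (fun (k : Nat) => oddb (PySem.List.pyGetD row (k : Int) 0)))) init).getD j false
    = rows.foldl (fun b row => b != oddb (PySem.List.pyGetD row (j : Int) 0)) (init.getD j false) := by
  induction rows with
  | nil => intro init _ j _; rfl
  | cons r rs ih =>
    intro init hlen j hj
    simp only [List.foldl_cons]
    rw [ih _ (by simp [hlen]) j hj]
    congr 1
    have hj1 : j < init.length := by omega
    have hj2 : j < (List.zipWith bne init
        ((List.range n).map (fun (k : Nat) => oddb (PySem.List.pyGetD r (k : Int) 0)))).length := by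
      simp [hlen]; omega
    rw [List.getD_eq_getElem _ _ hj2, List.getD_eq_getElem _ _ hj1, List.getElem_zipWith]
    congr 1
    rw [← List.getD_eq_getElem _ false, PySem.List.getD_map_range _ _ _ _ hj]

theorem zipfold_length (rows : List (List Int)) (n : Nat) : ∀ init : List Bool,
    init.length = n →
    (rows.foldl (fun acc row => List.zipWith bne acc
       ((List.range n).map (fun (k : Nat) => oddb (PySem.List.pyGetD row (k : Int) 0)))) init).length = n := by
  induction rows with
  | nil => intro init h; exact h
  | cons r rs ih => intro init h; exact ih _ (by simp [h])

-- B's xor-fold of row masks is the bit value of the column-parity list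
theorem xorfold_eq (rows : List (List Int)) (n : Nat) : ∀ init : List Bool,
    init.length = n →
    rows.foldl (fun c row => PySem.Int.bxor c
      ((List.range n).foldl
        (fun m (j : Nat) => m + (PySem.Int.band (PySem.List.pyGetD row (j : Int) 0) 1) <<< j) 0))
      ((bitsVal init : Nat) : Int)
    = ((bitsVal (rows.foldl (fun acc row => List.zipWith bne acc
        ((List.range n).map (fun (k : Nat) => oddb (PySem.List.pyGetD row (k : Int) 0)))) init) : Nat) : Int) := by
  induction rows with
  | nil => intro init _; rfl
  | cons r rs ih =>
    intro init hlen
    simp only [List.foldl_cons]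
    rw [rowmask_eq, PySem.Int.bxor_natCast,
      bitsVal_xor _ _ (by simp [hlen]), ih _ (by simp [hlen])]

-- generic: counting with if-then-else accumulation versus adding 0/1 terms
theorem count_fold_eq {α : Type} (p : α → Bool) (l : List α) : ∀ e : Int,
    l.foldl (fun ec r => if p r then ec + 1 else ec) e
    = l.foldl (fun ec r => ec + bi (p r)) e := by
  induction l with
  | nil => intro e; rfl
  | cons x xs ih => intro e; cases h : p x <;> simp [h, bi, ih]

theorem count_fold_val {α : Type} (p : α → Bool) (l : List α) (e : Int) :
    l.foldl (fun ec r => ec + bi (p r)) e = e + (l.countP p : Int) := by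
  rw [← count_fold_eq]
  exact PySem.List.foldl_count_if p l e

-- A's column sum (index loop over range(len(array))) equals a direct fold over the rows.
theorem colsum_eq (array : List (List Int)) (j : Int) :
    (PySem.List.pyRange 0 (array.length : Int) 1).foldl
      (fun acc i => acc + PySem.List.pyGetD (PySem.List.pyGetD array i []) j 0) 0
    = array.foldl (fun acc row => acc + PySem.List.pyGetD row j 0) 0 := by
  simpa using
    PySem.List.foldl_pyRange_zero_pyGetD array []
      (fun acc row => acc + PySem.List.pyGetD row j 0) 0

theorem two_dimensional_parity_check_eq (array : List (List Int)) :
    two_dimensional_parity_check array = two_dimensional_parity_check_alt array := by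
  simp only [two_dimensional_parity_check, two_dimensional_parity_check_alt]
  set n := (PySem.List.pyGetD array 0 []).length with hn
  -- split B's pair fold into its two independent components
  rw [PySem.List.foldl_prod_mk
    (fun c row => PySem.Int.bxor c
      ((List.range n).foldl
        (fun m (j : Nat) => m + (PySem.Int.band (PySem.List.pyGetD row (j : Int) 0) 1) <<< j) 0))
    (fun e row => e + row.foldl (fun p x => PySem.Int.bxor p (PySem.Int.band x 1)) 0)
    array 0 0]
  -- error-count component
  have herr : array.foldl
      (fun e row => e + row.foldl (fun p x => PySem.Int.bxor p (PySem.Int.band x 1)) 0) 0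
      = (array.map (fun row => row.foldl (· + ·) 0)).foldl
        (fun ec s => if PySem.Int.mod s 2 ≠ 0 then ec + 1 else ec) 0 := by
    rw [List.foldl_map]
    simp only [odd_cond, count_fold_eq]
    refine PySem.List.foldl_congr_mem _ _ _ _ (fun e row _ => ?_)
    have h := rowpar_eq row 0
    simp only [show oddb (0:Int) = false from rfl] at h
    simp only [bi] at h ⊢
    norm_num at h
    rw [h]
  -- column component
  have hmask : array.foldl
      (fun c row => PySem.Int.bxor c
        ((List.range n).foldl
          (fun m (j : Nat) => m + (PySem.Int.band (PySem.List.pyGetD row (j : Int) 0) 1) <<< j) 0)) 0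
      = ((bitsVal (array.foldl (fun acc row => List.zipWith bne acc
          ((List.range n).map (fun (k : Nat) => oddb (PySem.List.pyGetD row (k : Int) 0))))
          (List.replicate n false)) : Nat) : Int) := by
    have h := xorfold_eq array n (List.replicate n false) (by simp)
    rw [bitsVal_replicate] at h
    simpa using h
  -- identify the final bit list with the per-column parity map
  have hlist : array.foldl (fun acc row => List.zipWith bne acc
        ((List.range n).map (fun (k : Nat) => oddb (PySem.List.pyGetD row (k : Int) 0))))
        (List.replicate n false)
      = (List.range n).map (fun (j : Nat) =>
          oddb (array.foldl (fun a row => a + PySem.List.pyGetD row (j : Int) 0) 0)) := by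
    apply List.ext_getElem
    · simp only [List.length_map, List.length_range]
      exact zipfold_length array n _ (by simp)
    · intro i h1 h2
      have hi : i < n := by rw [zipfold_length array n _ (by simp)] at h1; exact h1
      rw [← List.getD_eq_getElem _ false, ← List.getD_eq_getElem _ false,
        zipfold_getD array n _ (by simp) i hi,
        PySem.List.getD_map_range _ _ _ _ hi]
      have hrep : (List.replicate n false).getD i false = false := by
        rw [List.getD_eq_getElem _ false (by simp [hi] : i < (List.replicate n false).length)]
        simp
      rw [hrep, show (false = oddb 0) from rfl, boolfold_sum]
  -- A's column side: rewrite its pyRange comprehension and count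
  have hcols : (PySem.List.pyRange 0 ((n : Nat) : Int) 1).map
      (fun j => (PySem.List.pyRange 0 (array.length : Int) 1).foldl
        (fun acc i => acc + PySem.List.pyGetD (PySem.List.pyGetD array i []) j 0) 0)
      = (List.range n).map (fun (j : Nat) =>
        array.foldl (fun acc row => acc + PySem.List.pyGetD row (↑j : Int) 0) 0) := by
    rw [PySem.List.pyRange_zero_nat n, List.map_map]
    refine List.map_congr_left fun k _ => ?_
    simp only [Function.comp_apply]
    rw [colsum_eq]
  rw [herr, hmask, hlist, bitCount_bitsVal, List.countP_map, hcols, List.foldl_map]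
  simp only [odd_cond]
  rw [count_fold_eq, count_fold_val]
  rfl

-- ===== VERDICT (by name: the statement is the Claim_ definition above) =====
theorem two_dimensional_parity_check_spec : Claim_equal_two_dimensional_parity_check := by
  intro array _ _
  exact two_dimensional_parity_check_eq array
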